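-- pv_equiv track=rewrite | github.com/rsltkscomm/Utility | utils/baseclass/custom_feature_generator.py | parse_examples
-- ===== SOURCE A (Python) =====
-- def parse_examples(examples_text: str):
--     if not examples_text or str(examples_text).strip() == "":
--         return [], []
--
--     rows = []
--     headers = []
--
--     example_sets = [item.strip() for item in str(examples_text).split(";") if item.strip()]
--
--     for example in example_sets:
--         pairs = [pair.strip() for pair in example.split(",") if pair.strip()]
--         row_data = {}
--
--         for pair in pairs:
--             if "=" in pair:
--                 key, value = pair.split("=", 1)
--                 key = key.strip()
--                 value = value.strip()
--                 row_data[key] = value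
--
--                 if key not in headers:
--                     headers.append(key)
--
--         if row_data:
--             rows.append(row_data)
--
--     return headers, rows
-- ===== SOURCE B (Python) =====
-- def parse_examples(examples_text: str):
--     # single character-level scan: no split/strip passes over the text
--     text = str(examples_text)
--     rows = []
--     row = {}
--     kbuf, vbuf, seen_eq = [], [], False
--     for ch in text:
--         if ch == ";" or ch == ",":
--             if seen_eq:
--                 row["".join(kbuf).strip()] = "".join(vbuf).strip()
--             kbuf, vbuf, seen_eq = [], [], False
--             if ch == ";":
--                 if row:
--                     rows.append(row)
--                 row = {}
--         elif ch == "=" and not seen_eq: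
--             seen_eq = True
--         elif seen_eq:
--             vbuf.append(ch)
--         else:
--             kbuf.append(ch)
--     if seen_eq:
--         row["".join(kbuf).strip()] = "".join(vbuf).strip()
--     if row:
--         rows.append(row)
--     headers = list(dict.fromkeys(k for r in rows for k in r))
--     return headers, rows
-- ===== Notes on version B (the rewrite author's own statement) =====
-- stated objective: alternative
-- what changed: B replaces A's staged semicolon/comma/equals split-and-strip passes and its interleaved header accumulation by a single character-level state-machine scan of the text (key and value buffers flushed at pair and row separators), deriving headers afterwards as the ordered dedup of all row keys.
import Mathlib
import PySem

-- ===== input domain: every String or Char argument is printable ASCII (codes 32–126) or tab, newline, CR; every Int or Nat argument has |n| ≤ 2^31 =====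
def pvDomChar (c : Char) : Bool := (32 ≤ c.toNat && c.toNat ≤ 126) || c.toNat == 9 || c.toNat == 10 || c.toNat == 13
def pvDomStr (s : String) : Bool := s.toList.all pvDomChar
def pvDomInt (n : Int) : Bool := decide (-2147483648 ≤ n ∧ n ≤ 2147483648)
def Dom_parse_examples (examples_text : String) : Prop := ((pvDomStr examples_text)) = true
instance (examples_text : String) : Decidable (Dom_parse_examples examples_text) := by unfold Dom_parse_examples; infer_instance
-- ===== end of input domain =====

-- B replaces A's split/strip/filter passes by a single character-level state-machine scan of the
-- text (headers derived afterwards as the ordered dedup of row keys); objective: alternative.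
-- Return values proved equal on all inputs.

-- ===== PORT A =====
-- A-side helpers: the two loop bodies of A, named (state = (headers, row_data) resp. (headers, rows)).
-- 'pair' here is already stripped, as in A's comprehension.
def pvA_inner_step (st2 : List String × PySem.Dict String String) (pair : String) :
    List String × PySem.Dict String String :=
  if PySem.Str.isIn "=" pair then
    -- pair.split("=", 1): "=" ≠ "" so splitMax? is some; with "=" in pair it has exactly 2 parts
    match (PySem.Str.splitMax? pair "=" 1).getD [] with
    | k :: v :: _ =>
      let key := PySem.Str.strip k
      let value := PySem.Str.strip v
      let row_data := st2.2.insert key value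
      let headers := if st2.1.contains key then st2.1 else st2.1 ++ [key]
      (headers, row_data)
    | _ => st2  -- unreachable: "=" in pair gives two parts
  else st2

def pvA_outer_step (st : List String × List (List (String × String))) (ex : String) :
    List String × List (List (String × String)) :=
  let pairs := (((PySem.Str.split? ex ",").getD []).filter
      (fun p => PySem.Str.strip p != "")).map PySem.Str.strip
  let inner := pairs.foldl pvA_inner_step (st.1, PySem.Dict.empty)
  (inner.1, if inner.2.items.isEmpty then st.2 else st.2 ++ [inner.2.items])

def parse_examples (examples_text : String) : List String × (List (List (String × String))) :=
  if examples_text == "" || PySem.Str.strip examples_text == "" then ([], [])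
  else
    let example_sets := (((PySem.Str.split? examples_text ";").getD []).filter
        (fun item => PySem.Str.strip item != "")).map PySem.Str.strip
    example_sets.foldl pvA_outer_step ([], [])

-- ===== PORT B =====
-- B-side helper: the body of B's character loop (state = (rows, row, kbuf, vbuf, seen_eq)).
def pvB_step (st : List (List (String × String)) × PySem.Dict String String × List Char × List Char × Bool)
    (ch : Char) : List (List (String × String)) × PySem.Dict String String × List Char × List Char × Bool :=
  match st with
  | (rows, row, kb, vb, seen) =>
    if ch == ';' || ch == ',' then
      let row' := if seen then
          row.insert (String.ofList (PySem.Chars.strip kb)) (String.ofList (PySem.Chars.strip vb))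
        else row
      if ch == ';' then
        ((if row'.items.isEmpty then rows else rows ++ [row'.items]), PySem.Dict.empty, [], [], false)
      else
        (rows, row', [], [], false)
    else if ch == '=' && !seen then
      (rows, row, kb, vb, true)
    else if seen then
      (rows, row, kb, vb ++ [ch], seen)
    else
      (rows, row, kb ++ [ch], vb, seen)

def parse_examples_alt (examples_text : String) : List String × (List (List (String × String))) :=
  match examples_text.toList.foldl pvB_step ([], PySem.Dict.empty, [], [], false) with
  | (rows, row, kb, vb, seen) =>
    let row' := if seen then
        row.insert (String.ofList (PySem.Chars.strip kb)) (String.ofList (PySem.Chars.strip vb))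
      else row
    let rows' := if row'.items.isEmpty then rows else rows ++ [row'.items]
    (PySem.List.dedup (rows'.flatMap (fun r => r.map (·.1))), rows')

-- ===== PRECONDITION & SPEC =====
def Spec_parse_examples (examples_text : String) (out : List String × (List (List (String × String)))) : Prop := out = parse_examples_alt examples_text
instance (examples_text : String) (out : List String × (List (List (String × String)))) : Decidable (Spec_parse_examples examples_text out) := by unfold Spec_parse_examples; infer_instance

-- ===== CLAIM (what is proved, stated in full; the proofs are below) =====
def Claim_equal_parse_examples : Prop := ∀ (examples_text : String), Dom_parse_examples examples_text → Spec_parse_examples examples_text (parse_examples examples_text)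

-- ===== LEMMAS AND PROOFS =====

-- ---------- the STAGED intermediate program (proof-only): parse per segment, filter, dedup keys ----------

-- key/value extracted from an (already stripped) pair, if any
def pvKV (pair : String) : Option (String × String) :=
  if PySem.Str.isIn "=" pair then
    match (PySem.Str.splitMax? pair "=" 1).getD [] with
    | k :: v :: _ => some (PySem.Str.strip k, PySem.Str.strip v)
    | _ => none
  else none

def pvS_row_step (row : PySem.Dict String String) (pair : String) : PySem.Dict String String :=
  let pair := PySem.Str.strip pair
  if PySem.Str.isIn "=" pair then
    match (PySem.Str.splitMax? pair "=" 1).getD [] with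
    | k :: v :: _ => row.insert (PySem.Str.strip k) (PySem.Str.strip v)
    | _ => row
  else row

def pvParseRow (ex : String) : PySem.Dict String String :=
  ((PySem.Str.split? ex ",").getD []).foldl pvS_row_step PySem.Dict.empty

def pvStaged (examples_text : String) : List String × (List (List (String × String))) :=
  if PySem.Str.strip examples_text == "" then ([], [])
  else
    let rows := (((PySem.Str.split? examples_text ";").getD []).map
        (fun e => (pvParseRow (PySem.Str.strip e)).items)).filter (fun r => !r.isEmpty)
    let headers := PySem.List.dedup (rows.flatMap (fun r => r.map (·.1)))
    (headers, rows)

-- key sequence (with duplicates) contributed by a raw piece list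
def pvKseq (l : List String) : List String :=
  l.filterMap (fun p => (pvKV (PySem.Str.strip p)).map (·.1))

def pvKseqE (e : String) : List String :=
  pvKseq ((PySem.Str.split? (PySem.Str.strip e) ",").getD [])

theorem pvA_inner_step_eq (st2 : List String × PySem.Dict String String) (pair : String) :
    pvA_inner_step st2 pair =
      match pvKV pair with
      | some (k, v) => (PySem.Set.add st2.1 k, st2.2.insert k v)
      | none => st2 := by
  unfold pvA_inner_step pvKV
  by_cases hin : PySem.Str.isIn "=" pair = true
  · simp only [hin, if_true]
    generalize (PySem.Str.splitMax? pair "=" 1).getD [] = parts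
    match parts with
    | [] => rfl
    | [k] => rfl
    | k :: v :: t => rfl
  · simp only [Bool.not_eq_true] at hin
    simp only [hin, Bool.false_eq_true, if_false]

theorem pvS_row_step_eq (row : PySem.Dict String String) (pair : String) :
    pvS_row_step row pair =
      match pvKV (PySem.Str.strip pair) with
      | some (k, v) => row.insert k v
      | none => row := by
  unfold pvS_row_step pvKV
  by_cases hin : PySem.Str.isIn "=" (PySem.Str.strip pair) = true
  · simp only [hin, if_true]
    generalize (PySem.Str.splitMax? (PySem.Str.strip pair) "=" 1).getD [] = parts
    match parts with
    | [] => rfl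
    | [k] => rfl
    | k :: v :: t => rfl
  · simp only [Bool.not_eq_true] at hin
    simp only [hin, Bool.false_eq_true, if_false]

theorem keys_insert' (d : PySem.Dict String String) (k v : String) :
    (d.insert k v).keys = PySem.Set.add d.keys k := by
  simp only [PySem.Dict.insert, PySem.Set.add, PySem.Dict.keys, PySem.Dict.contains,
    PySem.Set.contains]
  have h : (d.items.any fun p => p.1 == k) = (List.map (fun x => x.1) d.items).contains k := by
    simp [List.any_eq]
  rw [← h]
  split
  · simp only [List.map_map]
    congr 1; funext p
    by_cases hp : p.1 = k <;> simp [hp]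
  · simp

theorem pvKV_empty : pvKV "" = none := by rfl

-- A's inner fold over the filtered+stripped pieces computes
-- (headers updated by the key sequence, the staged row fold over the raw pieces)
theorem inner_fold_eq (l : List String) (h : List String) (d : PySem.Dict String String) :
    ((l.filter (fun p => PySem.Str.strip p != "")).map PySem.Str.strip).foldl pvA_inner_step (h, d)
      = (PySem.Set.update h (pvKseq l), l.foldl pvS_row_step d) := by
  induction l generalizing h d with
  | nil => rfl
  | cons p l ih =>
    by_cases hp : PySem.Str.strip p = ""
    · have hkv : pvKV (PySem.Str.strip p) = none := by rw [hp]; exact pvKV_empty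
      have hks : pvKseq (p :: l) = pvKseq l := by
        simp [pvKseq, hkv]
      have hb : pvS_row_step d p = d := by rw [pvS_row_step_eq, hkv]
      have hf : (p :: l).filter (fun p => PySem.Str.strip p != "") =
          l.filter (fun p => PySem.Str.strip p != "") := by
        simp [List.filter_cons, hp]
      rw [hf, hks, List.foldl_cons, hb]
      exact ih h d
    · have hf : (p :: l).filter (fun p => PySem.Str.strip p != "") =
          p :: l.filter (fun p => PySem.Str.strip p != "") := by
        simp [List.filter_cons, hp]
      rw [hf, List.map_cons, List.foldl_cons, List.foldl_cons,
        pvA_inner_step_eq (h, d) (PySem.Str.strip p), pvS_row_step_eq d p]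
      cases hkv : pvKV (PySem.Str.strip p) with
      | none =>
        have hks : pvKseq (p :: l) = pvKseq l := by
          simp [pvKseq, hkv]
        rw [hks]; exact ih h d
      | some kv =>
        obtain ⟨k, v⟩ := kv
        have hks : pvKseq (p :: l) = k :: pvKseq l := by
          simp [pvKseq, hkv]
        rw [hks]
        exact ih (PySem.Set.add h k) (d.insert k v)

theorem keys_fold (l : List String) (d : PySem.Dict String String) :
    (l.foldl pvS_row_step d).keys = PySem.Set.update d.keys (pvKseq l) := by
  induction l generalizing d with
  | nil => rfl
  | cons p l ih =>
    rw [List.foldl_cons, pvS_row_step_eq]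
    cases hkv : pvKV (PySem.Str.strip p) with
    | none =>
      have hks : pvKseq (p :: l) = pvKseq l := by
        simp [pvKseq, hkv]
      rw [hks]; exact ih d
    | some kv =>
      obtain ⟨k, v⟩ := kv
      have hks : pvKseq (p :: l) = k :: pvKseq l := by
        simp [pvKseq, hkv]
      rw [hks, ih (d.insert k v), keys_insert']
      rfl

theorem set_update_add (h acc : List String) (x : String) :
    PySem.Set.update h (PySem.Set.add acc x) = PySem.Set.add (PySem.Set.update h acc) x := by
  by_cases hx : x ∈ acc
  · have h1 : PySem.Set.add acc x = acc := by
      simp [PySem.Set.add, PySem.Set.contains, hx]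
    have h2 : PySem.Set.add (PySem.Set.update h acc) x = PySem.Set.update h acc := by
      have hm : x ∈ PySem.Set.update h acc := by
        rw [PySem.Set.mem_update]; exact Or.inr hx
      simp [PySem.Set.add, PySem.Set.contains, hm]
    rw [h1, h2]
  · have h1 : PySem.Set.add acc x = acc ++ [x] := by
      simp [PySem.Set.add, PySem.Set.contains, hx]
    rw [h1, PySem.Set.update, List.foldl_append]
    rfl

theorem set_update_update (xs : List String) (acc h : List String) :
    PySem.Set.update h (PySem.Set.update acc xs)
      = PySem.Set.update (PySem.Set.update h acc) xs := by
  induction xs generalizing acc h with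
  | nil => rfl
  | cons x xs ih =>
    show PySem.Set.update h (PySem.Set.update (PySem.Set.add acc x) xs)
        = PySem.Set.update (PySem.Set.add (PySem.Set.update h acc) x) xs
    rw [ih, set_update_add]

theorem set_update_ofList (h xs : List String) :
    PySem.Set.update h (PySem.Set.ofList xs) = PySem.Set.update h xs := by
  have h' := set_update_update xs PySem.Set.empty h
  simpa [PySem.Set.ofList, PySem.Set.update, PySem.Set.empty] using h'

theorem set_update_append (h xs ys : List String) :
    PySem.Set.update h (xs ++ ys) = PySem.Set.update (PySem.Set.update h xs) ys := by
  simp [PySem.Set.update, List.foldl_append]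

theorem update_flatMap_ofList (segs : List String) (h : List String) :
    PySem.Set.update h (segs.flatMap (fun e => PySem.Set.ofList (pvKseqE e)))
      = PySem.Set.update h (segs.flatMap pvKseqE) := by
  induction segs generalizing h with
  | nil => simp
  | cons e segs ih =>
    rw [List.flatMap_cons, List.flatMap_cons, set_update_append, set_update_append,
      set_update_ofList, ih]

theorem flatMap_filter_nonempty (rows : List (List (String × String))) :
    ((rows.filter (fun r => !r.isEmpty)).flatMap (fun r => r.map (·.1)))
      = rows.flatMap (fun r => r.map (·.1)) := by
  induction rows with
  | nil => rfl
  | cons r rows ih =>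
    by_cases hr : r = []
    · subst hr; simpa using ih
    · have hne : (!r.isEmpty) = true := by simp [hr]
      simp only [List.filter_cons, hne, if_pos, List.flatMap_cons, ih]

theorem row_keys (e : String) :
    (pvParseRow (PySem.Str.strip e)).items.map (·.1) = PySem.Set.ofList (pvKseqE e) := by
  have h := keys_fold ((PySem.Str.split? (PySem.Str.strip e) ",").getD []) PySem.Dict.empty
  simpa [pvParseRow, PySem.Dict.keys, PySem.Dict.empty, PySem.Set.ofList, PySem.Set.update,
    PySem.Set.empty, pvKseqE] using h

theorem row_alt_empty : (pvParseRow "").items = [] := by rfl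

theorem pvKseqE_empty (e : String) (he : PySem.Str.strip e = "") : pvKseqE e = [] := by
  rw [pvKseqE, he]; rfl

theorem pvA_outer_step_eq (st : List String × List (List (String × String))) (ex : String) :
    pvA_outer_step st ex =
      (PySem.Set.update st.1 (pvKseq ((PySem.Str.split? ex ",").getD [])),
       if (pvParseRow ex).items.isEmpty then st.2
       else st.2 ++ [(pvParseRow ex).items]) := by
  simp only [pvA_outer_step, pvParseRow]
  rw [inner_fold_eq]

theorem outer_fold_eq (segs : List String) (h : List String)
    (racc : List (List (String × String))) :
    ((segs.filter (fun e => PySem.Str.strip e != "")).map PySem.Str.strip).foldl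
        pvA_outer_step (h, racc)
      = (PySem.Set.update h (segs.flatMap pvKseqE),
         racc ++ (segs.map (fun e => (pvParseRow (PySem.Str.strip e)).items)).filter
           (fun r => !r.isEmpty)) := by
  induction segs generalizing h racc with
  | nil => simp
  | cons e segs ih =>
    by_cases he : PySem.Str.strip e = ""
    · have hk : pvKseqE e = [] := pvKseqE_empty e he
      have hr : (pvParseRow (PySem.Str.strip e)).items = [] := by
        rw [he]; exact row_alt_empty
      have hf : (e :: segs).filter (fun e => PySem.Str.strip e != "") =
          segs.filter (fun e => PySem.Str.strip e != "") := by
        simp [List.filter_cons, he]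
      rw [hf, ih h racc, List.flatMap_cons, hk, List.nil_append, List.map_cons, hr]
      simp [List.filter_cons]
    · have hf : (e :: segs).filter (fun e => PySem.Str.strip e != "") =
          e :: segs.filter (fun e => PySem.Str.strip e != "") := by
        simp [List.filter_cons, he]
      rw [hf, List.map_cons, List.foldl_cons]
      have hstep : pvA_outer_step (h, racc) (PySem.Str.strip e)
          = (PySem.Set.update h (pvKseqE e),
             if (pvParseRow (PySem.Str.strip e)).items.isEmpty then racc
             else racc ++ [(pvParseRow (PySem.Str.strip e)).items]) := by
        rw [pvA_outer_step_eq]; rfl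
      rw [hstep, ih, List.flatMap_cons, set_update_append, List.map_cons]
      by_cases hemp : (pvParseRow (PySem.Str.strip e)).items = []
      · simp [hemp, pvKseqE]
      · have hne : (!(pvParseRow (PySem.Str.strip e)).items.isEmpty) = true := by
          simp [hemp]
        simp only [hemp, List.isEmpty_eq_false_iff, List.filter_cons, hne, if_pos,
          List.isEmpty_iff, if_neg hemp, List.append_assoc, List.singleton_append, pvKseqE]
        simp

theorem map_items_flatMap (l : List String) :
    (l.map (fun e => (pvParseRow (PySem.Str.strip e)).items)).flatMap (fun r => r.map (·.1))
      = l.flatMap (fun e => PySem.Set.ofList (pvKseqE e)) := by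
  induction l with
  | nil => rfl
  | cons e l ih =>
    rw [List.map_cons, List.flatMap_cons, List.flatMap_cons, row_keys, ih]

-- A equals the staged program
theorem pvA_eq_staged (t : String) : parse_examples t = pvStaged t := by
  by_cases hg : PySem.Str.strip t = ""
  · have hb : (PySem.Str.strip t == "") = true := by simpa using hg
    simp [parse_examples, pvStaged, hb]
  · have hne : (PySem.Str.strip t == "") = false := by simpa using hg
    have hte : (t == "") = false := by
      by_contra hc
      have ht : t = "" := by
        cases hb : (t == "") with
        | true => exact by simpa using hb
        | false => exact absurd hb hc
      rw [ht] at hg; exact hg rfl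
    simp only [parse_examples, pvStaged, hne, hte, Bool.or_self,
      Bool.false_eq_true, if_false]
    rw [outer_fold_eq, List.nil_append]
    congr 1
    rw [flatMap_filter_nonempty, PySem.List.dedup_eq_ofList, map_items_flatMap]
    simpa [PySem.Set.ofList, PySem.Set.update, PySem.Set.empty] using
      (update_flatMap_ofList ((PySem.Str.split? t ";").getD []) []).symm

-- ---------- single-character split characterization ----------

def pvSplit1 (c : Char) : List Char → List (List Char)
  | [] => [[]]
  | x :: xs => if x = c then [] :: pvSplit1 c xs else (pvSplit1 c xs).modifyHead (x :: ·)

theorem pvSplit1_ne_nil (c : Char) (l : List Char) : pvSplit1 c l ≠ [] := by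
  induction l with
  | nil => simp [pvSplit1]
  | cons x xs ih =>
    simp only [pvSplit1]
    split
    · simp
    · cases h : pvSplit1 c xs with
      | nil => exact absurd h ih
      | cons a t => simp

theorem go_single (c : Char) : ∀ fuel (l cur : List Char) (acc : List (List Char)), l.length ≤ fuel →
    PySem.Chars.splitOn.go [c] fuel l cur acc = acc.reverse ++ (pvSplit1 c l).modifyHead (cur.reverse ++ ·) := by
  intro fuel
  induction fuel with
  | zero =>
    intro l cur acc h
    have : l = [] := by cases l <;> simp_all
    subst this
    simp [PySem.Chars.splitOn.go, pvSplit1]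
  | succ n ih =>
    intro l cur acc h
    cases l with
    | nil => simp [PySem.Chars.splitOn.go, pvSplit1]
    | cons x rest =>
      rw [PySem.Chars.splitOn.go]
      by_cases hx : x = c
      · subst hx
        have hp : List.isPrefixOf [x] (x :: rest) = true := by simp [List.isPrefixOf]
        simp only [hp, if_true, List.length_cons, List.drop_succ_cons, List.length_nil, List.drop_zero]
        rw [ih rest [] (cur.reverse :: acc) (by simpa using h)]
        simp only [pvSplit1, if_pos rfl, List.modifyHead_cons, List.reverse_cons, List.reverse_nil,
          List.nil_append, List.append_assoc, List.singleton_append]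
        cases hsp : pvSplit1 x rest with
        | nil => exact absurd hsp (pvSplit1_ne_nil x rest)
        | cons a t => simp
      · have hp2 : List.isPrefixOf [c] (x :: rest) = false := by
          simp [List.isPrefixOf]
          intro h'; exact absurd h'.symm hx
        simp only [hp2, Bool.false_eq_true, if_false]
        rw [ih rest (x :: cur) acc (by simpa using h)]
        simp only [pvSplit1, if_neg hx]
        cases hsp : pvSplit1 c rest with
        | nil => exact absurd hsp (pvSplit1_ne_nil c rest)
        | cons a t => simp

theorem splitOn_single (c : Char) (l : List Char) :
    PySem.Chars.splitOn l [c] = pvSplit1 c l := by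
  rw [PySem.Chars.splitOn, go_single c (l.length + 1) l [] [] (by omega)]
  cases h : pvSplit1 c l with
  | nil => exact absurd h (pvSplit1_ne_nil c l)
  | cons a t => simp

theorem goMax_zero (sep : List Char) (fuel : Nat) (l cur : List Char) (acc : List (List Char)) :
    PySem.Chars.splitOnMax.go sep fuel 0 l cur acc = acc.reverse ++ [cur.reverse ++ l] := by
  cases fuel with
  | zero => rw [PySem.Chars.splitOnMax.go]; simp
  | succ n => cases l with
    | nil =>
      rw [PySem.Chars.splitOnMax.go]; simp
      omega
    | cons x rest => rw [PySem.Chars.splitOnMax.go]; simp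

theorem goMax_one (c : Char) : ∀ fuel (l cur : List Char) (acc : List (List Char)), l.length ≤ fuel →
    PySem.Chars.splitOnMax.go [c] fuel 1 l cur acc = acc.reverse ++
      (if c ∈ l then [cur.reverse ++ l.takeWhile (· ≠ c), (l.dropWhile (· ≠ c)).tail]
       else [cur.reverse ++ l]) := by
  intro fuel
  induction fuel with
  | zero =>
    intro l cur acc h
    have : l = [] := by cases l <;> simp_all
    subst this
    rw [PySem.Chars.splitOnMax.go]; simp
  | succ n ih =>
    intro l cur acc h
    cases l with
    | nil =>
      rw [PySem.Chars.splitOnMax.go]; simp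
      omega
    | cons x rest =>
      rw [PySem.Chars.splitOnMax.go]
      by_cases hx : x = c
      · subst hx
        have hp : List.isPrefixOf [x] (x :: rest) = true := by simp [List.isPrefixOf]
        simp only [hp, if_true, one_ne_zero, if_false, List.length_cons, List.drop_succ_cons,
          List.length_nil, List.drop_zero]
        rw [goMax_zero]
        simp [List.takeWhile_cons, List.dropWhile_cons, List.reverse_cons]
      · have hp2 : List.isPrefixOf [c] (x :: rest) = false := by
          simp [List.isPrefixOf]
          intro h'; exact absurd h'.symm hx
        simp only [hp2, Bool.false_eq_true, if_false, one_ne_zero]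
        rw [ih rest (x :: cur) acc (by simpa using h)]
        by_cases hm : c ∈ rest
        · simp [hm, hx, List.takeWhile_cons, List.dropWhile_cons, Ne.symm]
        · simp [hm, hx, Ne.symm]

theorem splitOnMax_one (c : Char) (l : List Char) :
    PySem.Chars.splitOnMax l [c] 1 =
      (if c ∈ l then [l.takeWhile (· ≠ c), (l.dropWhile (· ≠ c)).tail] else [l]) := by
  rw [PySem.Chars.splitOnMax, if_neg (by norm_num)]
  rw [show Int.toNat 1 = 1 from rfl, goMax_one c (l.length + 1) l [] [] (by omega)]
  simp

-- ---------- whitespace / takeWhile / dropWhile facts ----------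

theorem dropWhile_sat_append {α : Type} (p : α → Bool) (a b : List α)
    (h : ∀ x ∈ a, p x = true) : (a ++ b).dropWhile p = b.dropWhile p := by
  rw [List.dropWhile_append]
  have : a.dropWhile p = [] := List.dropWhile_eq_nil_iff.2 h
  simp [this]

theorem takeWhile_sat_append {α : Type} (p : α → Bool) (a b : List α)
    (h : ∀ x ∈ a, p x = true) : (a ++ b).takeWhile p = a ++ b.takeWhile p := by
  rw [List.takeWhile_append]
  have hta : a.takeWhile p = a := List.takeWhile_eq_self_iff.2 h
  simp [hta]

theorem dropWhile_unsat_append {α : Type} (p : α → Bool) (a b : List α)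
    (h : a.dropWhile p ≠ []) : (a ++ b).dropWhile p = a.dropWhile p ++ b := by
  rw [List.dropWhile_append]
  simp [List.isEmpty_iff, h]

theorem takeWhile_unsat_append {α : Type} (p : α → Bool) (a b : List α)
    (h : a.dropWhile p ≠ []) : (a ++ b).takeWhile p = a.takeWhile p := by
  rw [List.takeWhile_append]
  have : ¬ (a.takeWhile p).length = a.length := by
    intro hl
    have := List.takeWhile_prefix (l := a) (p := p)
    have heq : a.takeWhile p = a := this.eq_of_length hl
    have : a.dropWhile p = [] := by
      have := List.takeWhile_append_dropWhile (p := p) (l := a)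
      rw [heq] at this
      simpa using this
    exact h this
  simp [this]

theorem pvSpace_ne_eq {c : Char} (h : PySem.Chars.isspace c = true) : ¬ (c = '=') := by
  intro hc; subst hc; exact absurd h (by decide)

theorem pvSpace_sat {ws : List Char} (h : ∀ x ∈ ws, PySem.Chars.isspace x = true) :
    ∀ x ∈ ws, (decide (x ≠ '=')) = true := by
  intro x hx
  simpa using pvSpace_ne_eq (h x hx)

theorem lstrip_sat_append (ws x : List Char) (h : ∀ c ∈ ws, PySem.Chars.isspace c = true) :
    PySem.Chars.lstrip (ws ++ x) = PySem.Chars.lstrip x := by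
  simp only [PySem.Chars.lstrip]
  exact dropWhile_sat_append _ _ _ h

theorem rstrip_append_ws (x ws : List Char) (h : ∀ c ∈ ws, PySem.Chars.isspace c = true) :
    PySem.Chars.rstrip (x ++ ws) = PySem.Chars.rstrip x := by
  simp only [PySem.Chars.rstrip, List.reverse_append]
  rw [dropWhile_sat_append _ _ _ (by simpa using h)]

theorem strip_ws_prefix (ws x : List Char) (h : ∀ c ∈ ws, PySem.Chars.isspace c = true) :
    PySem.Chars.strip (ws ++ x) = PySem.Chars.strip x := by
  simp only [PySem.Chars.strip]
  rw [lstrip_sat_append ws x h]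

theorem strip_allspace (l : List Char) (h : ∀ c ∈ l, PySem.Chars.isspace c = true) :
    PySem.Chars.strip l = [] := by
  simp only [PySem.Chars.strip, PySem.Chars.lstrip]
  rw [List.dropWhile_eq_nil_iff.2 h]
  rfl

theorem strip_ws_suffix (x ws : List Char) (h : ∀ c ∈ ws, PySem.Chars.isspace c = true) :
    PySem.Chars.strip (x ++ ws) = PySem.Chars.strip x := by
  by_cases hx : ∀ c ∈ x, PySem.Chars.isspace c = true
  · rw [strip_allspace x hx, strip_allspace]
    intro c hc
    rcases List.mem_append.1 hc with h1 | h2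
    · exact hx c h1
    · exact h c h2
  · have hne : x.dropWhile PySem.Chars.isspace ≠ [] := by
      intro hnil; exact hx (List.dropWhile_eq_nil_iff.1 hnil)
    simp only [PySem.Chars.strip, PySem.Chars.lstrip]
    rw [dropWhile_unsat_append _ _ _ hne]
    exact rstrip_append_ws _ _ h

-- decomposition l = (takeWhile space) ++ lstrip l  and  l = rstrip l ++ trailing spaces
theorem lstrip_decomp (l : List Char) :
    l = l.takeWhile PySem.Chars.isspace ++ PySem.Chars.lstrip l := by
  simp [PySem.Chars.lstrip, List.takeWhile_append_dropWhile]

theorem rstrip_decomp (l : List Char) :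
    ∃ ws, (∀ c ∈ ws, PySem.Chars.isspace c = true) ∧ l = PySem.Chars.rstrip l ++ ws := by
  refine ⟨(l.reverse.takeWhile PySem.Chars.isspace).reverse, ?_, ?_⟩
  · intro c hc
    exact List.mem_takeWhile_imp (by simpa using hc)
  · have h := List.takeWhile_append_dropWhile (p := PySem.Chars.isspace) (l := l.reverse)
    have h2 := congrArg List.reverse h
    simp only [List.reverse_append, List.reverse_reverse] at h2
    simpa [PySem.Chars.rstrip] using h2.symm

-- ---------- the pair extractor, char-level, and its whitespace invariance ----------

def pvKVc (p : List Char) : Option (String × String) :=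
  if '=' ∈ p then
    some (String.ofList (PySem.Chars.strip (p.takeWhile (· ≠ '='))),
          String.ofList (PySem.Chars.strip ((p.dropWhile (· ≠ '=')).tail)))
  else none

theorem pvKV_toList (s : String) : pvKV s = pvKVc s.toList := by
  unfold pvKV pvKVc
  have hin : PySem.Str.isIn "=" s = decide ('=' ∈ s.toList) := by
    have h1 := PySem.Str.isIn_iff_infix "=" s
    rw [show ("=" : String).toList = ['='] from rfl] at h1
    by_cases hm : '=' ∈ s.toList
    · have h2 : PySem.Str.isIn "=" s = true := h1.2 ((List.singleton_infix_iff _ _).2 hm)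
      rw [h2]
      simp [hm]
    · have h3 : PySem.Str.isIn "=" s ≠ true :=
        fun h => hm ((List.singleton_infix_iff _ _).1 (h1.1 h))
      simp only [Bool.not_eq_true] at h3
      rw [h3]
      simp [hm]
  by_cases hm : '=' ∈ s.toList
  · have hsm : PySem.Str.splitMax? s "=" 1 =
        some ([s.toList.takeWhile (· ≠ '='), (s.toList.dropWhile (· ≠ '=')).tail].map String.ofList) := by
      show Option.map _ (PySem.Chars.splitMax? s.toList "=".toList 1) = _
      rw [show ("=" : String).toList = ['='] from rfl, PySem.Chars.splitMax?]
      rw [if_neg (by simp), splitOnMax_one, if_pos hm]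
      rfl
    rw [hin, hsm]
    simp only [hm, decide_true, if_true, List.map_cons, List.map_nil, Option.getD_some]
    have hstr : ∀ l : List Char, PySem.Str.strip (String.ofList l) = String.ofList (PySem.Chars.strip l) := by
      intro l
      show String.ofList (PySem.Chars.strip (String.ofList l).toList) = _
      rw [String.toList_ofList]
    rw [hstr, hstr]
  · rw [hin]
    simp [hm]

-- invariance of pvKVc under surrounding whitespace
theorem pvKVc_ws_prefix (ws q : List Char) (h : ∀ c ∈ ws, PySem.Chars.isspace c = true) :
    pvKVc (ws ++ q) = pvKVc q := by
  unfold pvKVc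
  have hnw : '=' ∉ ws := fun hmem => (pvSpace_ne_eq (h '=' hmem)) rfl
  by_cases hm : '=' ∈ q
  · have hm' : '=' ∈ ws ++ q := List.mem_append.2 (Or.inr hm)
    rw [if_pos hm', if_pos hm]
    have hsat : ∀ x ∈ ws, (decide (x ≠ '=')) = true := pvSpace_sat h
    rw [takeWhile_sat_append _ _ _ hsat, dropWhile_sat_append _ _ _ hsat,
      strip_ws_prefix ws _ h]
  · have hm' : '=' ∉ ws ++ q := by
      intro hc
      rcases List.mem_append.1 hc with h1 | h2
      · exact hnw h1
      · exact hm h2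
    rw [if_neg hm', if_neg hm]

theorem pvKVc_ws_suffix (q ws : List Char) (h : ∀ c ∈ ws, PySem.Chars.isspace c = true) :
    pvKVc (q ++ ws) = pvKVc q := by
  unfold pvKVc
  have hnw : '=' ∉ ws := fun hmem => (pvSpace_ne_eq (h '=' hmem)) rfl
  by_cases hm : '=' ∈ q
  · have hm' : '=' ∈ q ++ ws := List.mem_append.2 (Or.inl hm)
    rw [if_pos hm', if_pos hm]
    have hne : q.dropWhile (fun x => decide (x ≠ '=')) ≠ [] := by
      intro hnil
      have := List.dropWhile_eq_nil_iff.1 hnil '=' hm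
      simp at this
    rw [takeWhile_unsat_append _ _ _ hne, dropWhile_unsat_append _ _ _ hne]
    cases hd : q.dropWhile (fun x => decide (x ≠ '=')) with
    | nil => exact absurd hd hne
    | cons a t =>
      simp only [List.cons_append, List.tail_cons]
      rw [strip_ws_suffix t ws h]
  · have hm' : '=' ∉ q ++ ws := by
      intro hc
      rcases List.mem_append.1 hc with h1 | h2
      · exact hm h1
      · exact hnw h2
    rw [if_neg hm', if_neg hm]

theorem pvKVc_strip (p : List Char) : pvKVc (PySem.Chars.strip p) = pvKVc p := by
  have h1 := lstrip_decomp p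
  obtain ⟨ws, hws, h2⟩ := rstrip_decomp (PySem.Chars.lstrip p)
  calc pvKVc (PySem.Chars.strip p)
      = pvKVc (PySem.Chars.strip p ++ ws) := by
        rw [pvKVc_ws_suffix _ _ hws]
    _ = pvKVc (PySem.Chars.lstrip p) := by
        simp only [PySem.Chars.strip]
        conv_rhs => rw [h2]
    _ = pvKVc (p.takeWhile PySem.Chars.isspace ++ PySem.Chars.lstrip p) := by
        rw [pvKVc_ws_prefix _ _ (fun c hc => List.mem_takeWhile_imp hc)]
    _ = pvKVc p := by rw [← lstrip_decomp p]

-- ---------- scanner analysis ----------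

def pvPairIns (row : PySem.Dict String String) (p : List Char) : PySem.Dict String String :=
  match pvKVc p with
  | some (k, v) => row.insert k v
  | none => row

def pvRowFold (row : PySem.Dict String String) (ps : List (List Char)) : PySem.Dict String String :=
  ps.foldl pvPairIns row

def pvAppendIf (rows : List (List (String × String))) (row : PySem.Dict String String) :
    List (List (String × String)) :=
  if row.items.isEmpty then rows else rows ++ [row.items]

def pvPairFlush (row : PySem.Dict String String) (kb vb : List Char) (seen : Bool) :
    PySem.Dict String String :=
  if seen then
    row.insert (String.ofList (PySem.Chars.strip kb)) (String.ofList (PySem.Chars.strip vb))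
  else row

def pvFinal (st : List (List (String × String)) × PySem.Dict String String × List Char × List Char × Bool) :
    List (List (String × String)) :=
  match st with
  | (rows, row, kb, vb, seen) => pvAppendIf rows (pvPairFlush row kb vb seen)

def pvPend (kb vb : List Char) (seen : Bool) : List Char :=
  if seen then kb ++ '=' :: vb else kb

def pvRowsOut (rows : List (List (String × String))) (row : PySem.Dict String String) :
    List (List Char) → List (List (String × String))
  | [] => rows
  | seg :: segs =>
    match segs with
    | [] => pvAppendIf rows (pvRowFold row (pvSplit1 ',' seg))
    | _ :: _ => pvRowsOut (pvAppendIf rows (pvRowFold row (pvSplit1 ',' seg))) PySem.Dict.empty segs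

-- small pvSplit1 facts
theorem pvSplit1_no_sep (c : Char) (l : List Char) (h : c ∉ l) : pvSplit1 c l = [l] := by
  induction l with
  | nil => rfl
  | cons x xs ih =>
    have hx : x ≠ c := fun hc => h (hc ▸ List.mem_cons_self)
    have hxs : c ∉ xs := fun hc => h (List.mem_cons_of_mem _ hc)
    simp only [pvSplit1, if_neg hx, ih hxs, List.modifyHead_cons]

theorem pvSplit1_append_no_sep_left (c : Char) (xs ys : List Char) (h : c ∉ xs) :
    pvSplit1 c (xs ++ ys) = (pvSplit1 c ys).modifyHead (xs ++ ·) := by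
  induction xs with
  | nil =>
    cases hs : pvSplit1 c ys with
    | nil => exact absurd hs (pvSplit1_ne_nil c ys)
    | cons a t => simp [hs]
  | cons x xs ih =>
    have hx : x ≠ c := fun hc => h (hc ▸ List.mem_cons_self)
    have hxs : c ∉ xs := fun hc => h (List.mem_cons_of_mem _ hc)
    simp only [List.cons_append, pvSplit1, if_neg hx, ih hxs]
    cases hs : pvSplit1 c ys with
    | nil => exact absurd hs (pvSplit1_ne_nil c ys)
    | cons a t => simp [hs]

def pvModLast (f : List Char → List Char) : List (List Char) → List (List Char)
  | [] => []
  | [a] => [f a]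
  | a :: b :: t => a :: pvModLast f (b :: t)

theorem pvSplit1_append_no_sep_right (c : Char) (xs ys : List Char) (h : c ∉ ys) :
    pvSplit1 c (xs ++ ys) = pvModLast (· ++ ys) (pvSplit1 c xs) := by
  induction xs with
  | nil => simp [pvSplit1, pvSplit1_no_sep c ys h, pvModLast]
  | cons x xs ih =>
    by_cases hx : x = c
    · subst hx
      simp only [List.cons_append, pvSplit1, if_pos rfl, ih]
      cases hs : pvSplit1 x xs with
      | nil => exact absurd hs (pvSplit1_ne_nil x xs)
      | cons a t => cases t <;> simp [pvModLast]
    · simp only [List.cons_append, pvSplit1, if_neg hx, ih]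
      cases hs : pvSplit1 c xs with
      | nil => exact absurd hs (pvSplit1_ne_nil c xs)
      | cons a t => cases t <;> simp [pvModLast]

theorem pvSplit1_mem_subset (c : Char) (l : List Char) :
    ∀ s ∈ pvSplit1 c l, ∀ x ∈ s, x ∈ l := by
  induction l with
  | nil =>
    intro s hs x hx
    simp [pvSplit1] at hs
    subst hs; simp at hx
  | cons y ys ih =>
    intro s hs x hx
    by_cases hy : y = c
    · simp only [pvSplit1, if_pos hy] at hs
      rcases List.mem_cons.1 hs with h1 | h2
      · subst h1; simp at hx
      · exact List.mem_cons_of_mem _ (ih s h2 x hx)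
    · simp only [pvSplit1, if_neg hy] at hs
      cases hsp : pvSplit1 c ys with
      | nil => exact absurd hsp (pvSplit1_ne_nil c ys)
      | cons a t =>
        rw [hsp, List.modifyHead_cons] at hs
        rcases List.mem_cons.1 hs with h1 | h2
        · subst h1
          rcases List.mem_cons.1 hx with hx1 | hx2
          · subst hx1; exact List.mem_cons_self
          · exact List.mem_cons_of_mem _ (ih a (hsp ▸ List.mem_cons_self) x hx2)
        · exact List.mem_cons_of_mem _ (ih s (hsp ▸ List.mem_cons_of_mem _ h2) x hx)

-- pvRowFold whitespace invariance
theorem pvPairIns_congr (row : PySem.Dict String String) (p q : List Char)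
    (h : pvKVc p = pvKVc q) : pvPairIns row p = pvPairIns row q := by
  unfold pvPairIns; rw [h]

theorem pvRowFold_modLast_ws (ws : List Char) (h : ∀ c ∈ ws, PySem.Chars.isspace c = true) :
    ∀ (ps : List (List Char)) (row : PySem.Dict String String),
    pvRowFold row (pvModLast (· ++ ws) ps) = pvRowFold row ps := by
  intro ps
  induction ps with
  | nil => intro row; rfl
  | cons a t ih =>
    intro row
    cases t with
    | nil =>
      show pvRowFold row [a ++ ws] = pvRowFold row [a]
      show pvPairIns row (a ++ ws) = pvPairIns row a
      exact pvPairIns_congr row _ _ (pvKVc_ws_suffix a ws h)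
    | cons b t' =>
      show pvRowFold (pvPairIns row a) (pvModLast (· ++ ws) (b :: t'))
          = pvRowFold (pvPairIns row a) (b :: t')
      exact ih _

theorem pvRowFold_strip (row : PySem.Dict String String) (seg : List Char) :
    pvRowFold row (pvSplit1 ',' (PySem.Chars.strip seg)) = pvRowFold row (pvSplit1 ',' seg) := by
  obtain ⟨ws, hws, hdec⟩ := rstrip_decomp (PySem.Chars.lstrip seg)
  have hws2 : ∀ c ∈ seg.takeWhile PySem.Chars.isspace, PySem.Chars.isspace c = true :=
    fun c hc => List.mem_takeWhile_imp hc
  have hnw : ',' ∉ seg.takeWhile PySem.Chars.isspace := by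
    intro hmem
    have := hws2 ',' hmem
    exact absurd this (by decide)
  have hnw2 : ',' ∉ ws := by
    intro hmem
    have := hws ',' hmem
    exact absurd this (by decide)
  have hstep2 : pvRowFold row (pvSplit1 ',' (PySem.Chars.lstrip seg))
      = pvRowFold row (pvSplit1 ',' (PySem.Chars.strip seg)) := by
    conv_lhs => rw [show PySem.Chars.lstrip seg = PySem.Chars.strip seg ++ ws from by
      rw [PySem.Chars.strip]; exact hdec]
    rw [pvSplit1_append_no_sep_right ',' _ ws hnw2, pvRowFold_modLast_ws ws hws]
  have hstep1 : pvRowFold row (pvSplit1 ',' seg)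
      = pvRowFold row (pvSplit1 ',' (PySem.Chars.lstrip seg)) := by
    conv_lhs => rw [lstrip_decomp seg]
    rw [pvSplit1_append_no_sep_left ',' _ _ hnw]
    cases hs : pvSplit1 ',' (PySem.Chars.lstrip seg) with
    | nil => exact absurd hs (pvSplit1_ne_nil _ _)
    | cons a t =>
      rw [List.modifyHead_cons]
      show pvRowFold (pvPairIns row _) t = pvRowFold (pvPairIns row a) t
      rw [pvPairIns_congr row _ a (pvKVc_ws_prefix _ a hws2)]
  rw [hstep1, hstep2]

-- flushing the pending pair = pvPairIns of the pending char list
theorem pvPairFlush_eq (row : PySem.Dict String String) (kb vb : List Char) (seen : Bool)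
    (hkb : '=' ∉ kb) :
    pvPairFlush row kb vb seen = pvPairIns row (pvPend kb vb seen) := by
  cases seen with
  | false =>
    rw [show pvPairFlush row kb vb false = row from rfl, show pvPend kb vb false = kb from rfl]
    show row = pvPairIns row kb
    unfold pvPairIns pvKVc
    rw [if_neg hkb]
  | true =>
    rw [show pvPairFlush row kb vb true
        = row.insert (String.ofList (PySem.Chars.strip kb)) (String.ofList (PySem.Chars.strip vb))
      from rfl, show pvPend kb vb true = kb ++ '=' :: vb from rfl]
    unfold pvPairIns pvKVc
    have hm : '=' ∈ kb ++ '=' :: vb := List.mem_append.2 (Or.inr List.mem_cons_self)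
    rw [if_pos hm]
    have hsat : ∀ x ∈ kb, (decide (x ≠ '=')) = true := by
      intro x hx
      simp only [decide_eq_true_iff]
      intro hc; subst hc; exact hkb hx
    rw [takeWhile_sat_append _ _ _ hsat, dropWhile_sat_append _ _ _ hsat]
    simp

theorem pvRowsOut_cons_ne (rows : List (List (String × String))) (row : PySem.Dict String String)
    (seg : List Char) (s2 : List Char) (t : List (List Char)) :
    pvRowsOut rows row (seg :: s2 :: t)
      = pvRowsOut (pvAppendIf rows (pvRowFold row (pvSplit1 ',' seg))) PySem.Dict.empty (s2 :: t) := rfl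

theorem pvRowsOut_head_congr (rows : List (List (String × String)))
    (row row' : PySem.Dict String String) (s s' : List Char) (segs : List (List Char))
    (h : pvRowFold row (pvSplit1 ',' s) = pvRowFold row' (pvSplit1 ',' s')) :
    pvRowsOut rows row (s :: segs) = pvRowsOut rows row' (s' :: segs) := by
  cases segs with
  | nil => show pvAppendIf rows _ = pvAppendIf rows _; rw [h]
  | cons b t => rw [pvRowsOut_cons_ne, pvRowsOut_cons_ne, h]

theorem modifyHead_nil_append (l : List (List Char)) :
    l.modifyHead (fun a => ([] : List Char) ++ a) = l := by
  cases l <;> simp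

-- THE scan lemma: folding B's step over the characters = per-segment processing
theorem pvScan_eq : ∀ (cs : List Char) (rows : List (List (String × String)))
    (row : PySem.Dict String String) (kb vb : List Char) (seen : Bool),
    '=' ∉ kb → ',' ∉ kb → ',' ∉ vb → (seen = false → vb = []) →
    pvFinal (cs.foldl pvB_step (rows, row, kb, vb, seen))
      = pvRowsOut rows row ((pvSplit1 ';' cs).modifyHead (pvPend kb vb seen ++ ·)) := by
  intro cs
  induction cs with
  | nil =>
    intro rows row kb vb seen hkb hkb2 hvb hsv
    have hpend : ',' ∉ pvPend kb vb seen := by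
      cases seen with
      | false => rw [show pvPend kb vb false = kb from rfl]; exact hkb2
      | true =>
        rw [show pvPend kb vb true = kb ++ '=' :: vb from rfl]
        intro hc
        rcases List.mem_append.1 hc with h1 | h2
        · exact hkb2 h1
        · rcases List.mem_cons.1 h2 with h3 | h4
          · exact absurd h3 (by decide)
          · exact hvb h4
    show pvFinal (rows, row, kb, vb, seen) = _
    simp only [pvSplit1, List.modifyHead_cons, List.append_nil]
    show pvAppendIf rows (pvPairFlush row kb vb seen)
        = pvAppendIf rows (pvRowFold row (pvSplit1 ',' (pvPend kb vb seen)))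
    rw [pvSplit1_no_sep ',' _ hpend]
    show pvAppendIf rows (pvPairFlush row kb vb seen)
        = pvAppendIf rows (pvPairIns row (pvPend kb vb seen))
    rw [pvPairFlush_eq row kb vb seen hkb]
  | cons c cs ih =>
    intro rows row kb vb seen hkb hkb2 hvb hsv
    have hpend : ',' ∉ pvPend kb vb seen := by
      cases seen with
      | false => rw [show pvPend kb vb false = kb from rfl]; exact hkb2
      | true =>
        rw [show pvPend kb vb true = kb ++ '=' :: vb from rfl]
        intro hc
        rcases List.mem_append.1 hc with h1 | h2
        · exact hkb2 h1
        · rcases List.mem_cons.1 h2 with h3 | h4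
          · exact absurd h3 (by decide)
          · exact hvb h4
    rw [List.foldl_cons]
    by_cases hc1 : c = ';'
    · subst hc1
      have hstep : pvB_step (rows, row, kb, vb, seen) ';'
          = (pvAppendIf rows (pvPairFlush row kb vb seen), PySem.Dict.empty, [], [], false) := by
        simp [pvB_step, pvAppendIf, pvPairFlush]
      rw [hstep, ih _ _ [] [] false (by simp) (by simp) (by simp) (fun _ => rfl)]
      rw [show pvPend [] [] false = [] from rfl, modifyHead_nil_append]
      have hrhs : pvSplit1 ';' (';' :: cs) = [] :: pvSplit1 ';' cs := by
        simp [pvSplit1]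
      rw [hrhs, List.modifyHead_cons, List.append_nil]
      cases hsegs : pvSplit1 ';' cs with
      | nil => exact absurd hsegs (pvSplit1_ne_nil _ _)
      | cons s1 rest =>
        rw [pvRowsOut_cons_ne]
        have hone : pvRowFold row (pvSplit1 ',' (pvPend kb vb seen)) = pvPairFlush row kb vb seen := by
          rw [pvSplit1_no_sep ',' _ hpend]
          show pvPairIns row (pvPend kb vb seen) = _
          rw [pvPairFlush_eq row kb vb seen hkb]
        rw [hone]
    · by_cases hc2 : c = ','
      · subst hc2
        have hstep : pvB_step (rows, row, kb, vb, seen) ','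
            = (rows, pvPairFlush row kb vb seen, [], [], false) := by
          simp [pvB_step, pvPairFlush]
        rw [hstep, ih _ _ [] [] false (by simp) (by simp) (by simp) (fun _ => rfl)]
        rw [show pvPend [] [] false = [] from rfl, modifyHead_nil_append]
        have hrhs : pvSplit1 ';' (',' :: cs) = (pvSplit1 ';' cs).modifyHead (',' :: ·) := by
          simp [pvSplit1, hc1]
        rw [hrhs]
        cases hsegs : pvSplit1 ';' cs with
        | nil => exact absurd hsegs (pvSplit1_ne_nil _ _)
        | cons s1 rest =>
          simp only [List.modifyHead_cons]
          refine (pvRowsOut_head_congr rows row (pvPairFlush row kb vb seen)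
            (pvPend kb vb seen ++ ',' :: s1) s1 rest ?_).symm
          rw [pvSplit1_append_no_sep_left ',' _ _ hpend]
          rw [show pvSplit1 ',' (',' :: s1) = [] :: pvSplit1 ',' s1 from by simp [pvSplit1]]
          rw [List.modifyHead_cons, List.append_nil]
          show pvRowFold (pvPairIns row (pvPend kb vb seen)) (pvSplit1 ',' s1)
              = pvRowFold (pvPairFlush row kb vb seen) (pvSplit1 ',' s1)
          rw [pvPairFlush_eq row kb vb seen hkb]
      · -- c is neither ';' nor ','
        have hsplit : pvSplit1 ';' (c :: cs) = (pvSplit1 ';' cs).modifyHead (c :: ·) := by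
          simp [pvSplit1, hc1]
        by_cases hc3 : c = '='
        · subst hc3
          cases seen with
          | false =>
            have hvb0 : vb = [] := hsv rfl
            subst hvb0
            have hstep : pvB_step (rows, row, kb, [], false) '='
                = (rows, row, kb, [], true) := by
              simp [pvB_step, hc1, hc2]
            rw [hstep, ih _ _ kb [] true hkb hkb2 (by simp) (by simp)]
            rw [hsplit]
            cases hsegs : pvSplit1 ';' cs with
            | nil => exact absurd hsegs (pvSplit1_ne_nil _ _)
            | cons s1 rest =>
              simp only [List.modifyHead_cons]
              congr 1
              simp [pvPend]
          | true =>
            have hstep : pvB_step (rows, row, kb, vb, true) '='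
                = (rows, row, kb, vb ++ ['='], true) := by
              simp [pvB_step, hc1, hc2]
            rw [hstep, ih _ _ kb (vb ++ ['=']) true hkb hkb2
              (by
                intro hcm
                rcases List.mem_append.1 hcm with h1 | h2
                · exact hvb h1
                · rcases List.mem_cons.1 h2 with h3 | h4
                  · exact absurd h3 (by decide)
                  · simp at h4)
              (by simp)]
            rw [hsplit]
            cases hsegs : pvSplit1 ';' cs with
            | nil => exact absurd hsegs (pvSplit1_ne_nil _ _)
            | cons s1 rest =>
              simp only [List.modifyHead_cons]
              congr 1
              simp [pvPend]
        · -- ordinary character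
          cases seen with
          | false =>
            have hvb0 : vb = [] := hsv rfl
            subst hvb0
            have hstep : pvB_step (rows, row, kb, [], false) c
                = (rows, row, kb ++ [c], [], false) := by
              simp [pvB_step, hc1, hc2, hc3]
            rw [hstep, ih _ _ (kb ++ [c]) [] false
              (by
                intro hcm
                rcases List.mem_append.1 hcm with h1 | h2
                · exact hkb h1
                · rcases List.mem_cons.1 h2 with h3 | h4
                  · exact absurd h3.symm hc3
                  · simp at h4)
              (by
                intro hcm
                rcases List.mem_append.1 hcm with h1 | h2
                · exact hkb2 h1
                · rcases List.mem_cons.1 h2 with h3 | h4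
                  · exact absurd h3.symm hc2
                  · simp at h4)
              (by simp) (fun _ => rfl)]
            rw [hsplit]
            cases hsegs : pvSplit1 ';' cs with
            | nil => exact absurd hsegs (pvSplit1_ne_nil _ _)
            | cons s1 rest =>
              simp only [List.modifyHead_cons]
              congr 1
              simp [pvPend]
          | true =>
            have hstep : pvB_step (rows, row, kb, vb, true) c
                = (rows, row, kb, vb ++ [c], true) := by
              simp [pvB_step, hc1, hc2, hc3]
            rw [hstep, ih _ _ kb (vb ++ [c]) true hkb hkb2
              (by
                intro hcm
                rcases List.mem_append.1 hcm with h1 | h2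
                · exact hvb h1
                · rcases List.mem_cons.1 h2 with h3 | h4
                  · exact absurd h3.symm hc2
                  · simp at h4)
              (by simp)]
            rw [hsplit]
            cases hsegs : pvSplit1 ';' cs with
            | nil => exact absurd hsegs (pvSplit1_ne_nil _ _)
            | cons s1 rest =>
              simp only [List.modifyHead_cons]
              congr 1
              simp [pvPend]

-- parse_examples_alt in terms of pvRowsOut
theorem alt_rows (t : String) :
    parse_examples_alt t =
      (PySem.List.dedup ((pvRowsOut [] PySem.Dict.empty (pvSplit1 ';' t.toList)).flatMap
          (fun r => r.map (·.1))),
       pvRowsOut [] PySem.Dict.empty (pvSplit1 ';' t.toList)) := by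
  have h := pvScan_eq t.toList [] PySem.Dict.empty [] [] false (by simp) (by simp) (by simp)
    (fun _ => rfl)
  rw [show pvPend [] [] false = [] from rfl, modifyHead_nil_append] at h
  unfold parse_examples_alt
  rcases hst : t.toList.foldl pvB_step ([], PySem.Dict.empty, [], [], false) with
    ⟨rows, row, kb, vb, seen⟩
  rw [hst] at h
  simp only [pvFinal, pvAppendIf, pvPairFlush] at h
  simp only [← h]

-- pvRowsOut as a filtered map
theorem pvRowsOut_spec : ∀ (segs : List (List Char)) (rows : List (List (String × String))),
    pvRowsOut rows PySem.Dict.empty segs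
      = rows ++ ((segs.map (fun s => (pvRowFold PySem.Dict.empty (pvSplit1 ',' s)).items)).filter
          (fun r => !r.isEmpty)) := by
  intro segs
  induction segs with
  | nil => intro rows; simp [pvRowsOut]
  | cons seg segs ih =>
    intro rows
    cases segs with
    | nil =>
      show pvAppendIf rows _ = _
      simp only [List.map_cons, List.map_nil, List.filter_cons]
      unfold pvAppendIf
      by_cases hemp : (pvRowFold PySem.Dict.empty (pvSplit1 ',' seg)).items.isEmpty
      · simp [hemp]
      · simp [hemp]
    | cons s2 t =>
      rw [pvRowsOut_cons_ne, ih]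
      simp only [List.map_cons, List.filter_cons]
      unfold pvAppendIf
      by_cases hemp : (pvRowFold PySem.Dict.empty (pvSplit1 ',' seg)).items.isEmpty
      · simp [hemp]
      · simp [hemp]

-- per-segment: the staged row of the stripped segment = the scanner's row of the raw segment
theorem seg_row (s : List Char) :
    pvParseRow (PySem.Str.strip (String.ofList s)) = pvRowFold PySem.Dict.empty (pvSplit1 ',' s) := by
  have hstr : PySem.Str.strip (String.ofList s) = String.ofList (PySem.Chars.strip s) := by
    show String.ofList (PySem.Chars.strip (String.ofList s).toList) = _
    rw [String.toList_ofList]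
  rw [hstr]
  have hsplit : (PySem.Str.split? (String.ofList (PySem.Chars.strip s)) ",").getD []
      = (pvSplit1 ',' (PySem.Chars.strip s)).map String.ofList := by
    show (Option.map _ (PySem.Chars.split? (String.ofList (PySem.Chars.strip s)).toList
      (",".toList))).getD [] = _
    rw [String.toList_ofList, show ("," : String).toList = [','] from rfl, PySem.Chars.split?,
      if_neg (by simp), splitOn_single]
    rfl
  unfold pvParseRow
  rw [hsplit, List.foldl_map]
  have hfun : (fun (d : PySem.Dict String String) (p : List Char) => pvS_row_step d (String.ofList p))
      = pvPairIns := by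
    funext d p
    rw [pvS_row_step_eq]
    have : pvKV (PySem.Str.strip (String.ofList p)) = pvKVc p := by
      rw [pvKV_toList]
      have h2 : (PySem.Str.strip (String.ofList p)).toList = PySem.Chars.strip p := by
        show (String.ofList (PySem.Chars.strip (String.ofList p).toList)).toList = _
        rw [String.toList_ofList, String.toList_ofList]
      rw [h2, pvKVc_strip]
    rw [this]
    unfold pvPairIns
    rfl
  rw [hfun]
  show pvRowFold PySem.Dict.empty (pvSplit1 ',' (PySem.Chars.strip s)) = _
  exact pvRowFold_strip PySem.Dict.empty s

-- strip t = "" iff every character is whitespace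
theorem strip_nil_allspace (l : List Char) (h : PySem.Chars.strip l = []) :
    ∀ c ∈ l, PySem.Chars.isspace c = true := by
  obtain ⟨ws, hws, hdec⟩ := rstrip_decomp (PySem.Chars.lstrip l)
  have hl : l = l.takeWhile PySem.Chars.isspace ++ ws := by
    conv_lhs => rw [lstrip_decomp l]
    rw [hdec]
    rw [PySem.Chars.strip] at h
    rw [h, List.nil_append]
  intro c hc
  rw [hl] at hc
  rcases List.mem_append.1 hc with h1 | h2
  · exact List.mem_takeWhile_imp h1
  · exact hws c h2

-- the staged program equals B
theorem pvStaged_eq_alt (t : String) : pvStaged t = parse_examples_alt t := by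
  rw [alt_rows, pvRowsOut_spec]
  by_cases hg : PySem.Chars.strip t.toList = []
  · have hb : (PySem.Str.strip t == "") = true := by
      have : PySem.Str.strip t = "" := by
        show String.ofList (PySem.Chars.strip t.toList) = ""
        rw [hg]
      simp [this]
    have hall : ∀ c ∈ t.toList, PySem.Chars.isspace c = true := strip_nil_allspace _ hg
    have hfil : ((pvSplit1 ';' t.toList).map
        (fun s => (pvRowFold PySem.Dict.empty (pvSplit1 ',' s)).items)).filter
          (fun r => !r.isEmpty) = [] := by
      rw [List.filter_eq_nil_iff]
      intro r hr
      rcases List.mem_map.1 hr with ⟨s, hs, rfl⟩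
      have hseg : ∀ c ∈ s, PySem.Chars.isspace c = true :=
        fun c hc => hall c (pvSplit1_mem_subset ';' t.toList s hs c hc)
      have hstrip : PySem.Chars.strip s = [] := strip_allspace s hseg
      have : pvRowFold PySem.Dict.empty (pvSplit1 ',' s)
          = pvRowFold PySem.Dict.empty (pvSplit1 ',' (PySem.Chars.strip s)) :=
        (pvRowFold_strip _ s).symm
      rw [this, hstrip]
      simp [pvRowFold, pvPairIns, pvKVc, pvSplit1, PySem.Dict.empty, PySem.Dict.items]
    rw [hfil]
    simp [pvStaged, hb, PySem.List.dedup]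
  · have hne : (PySem.Str.strip t == "") = false := by
      have : PySem.Str.strip t ≠ "" := by
        intro hc
        have := congrArg String.toList hc
        rw [show (PySem.Str.strip t).toList = PySem.Chars.strip t.toList from by
          show (String.ofList (PySem.Chars.strip t.toList)).toList = _
          rw [String.toList_ofList]] at this
        exact hg this
      simp [this]
    simp only [pvStaged, hne, Bool.false_eq_true, if_false]
    have hsegs : (PySem.Str.split? t ";").getD [] = (pvSplit1 ';' t.toList).map String.ofList := by
      show (Option.map _ (PySem.Chars.split? t.toList (";".toList))).getD [] = _
      rw [show (";" : String).toList = [';'] from rfl, PySem.Chars.split?,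
        if_neg (by simp), splitOn_single]
      rfl
    rw [hsegs, List.map_map]
    have hmap : ((pvSplit1 ';' t.toList).map
          ((fun e => (pvParseRow (PySem.Str.strip e)).items) ∘ String.ofList))
        = (pvSplit1 ';' t.toList).map
          (fun s => (pvRowFold PySem.Dict.empty (pvSplit1 ',' s)).items) := by
      apply List.map_congr_left
      intro s _
      show (pvParseRow (PySem.Str.strip (String.ofList s))).items = _
      rw [seg_row]
    rw [hmap]
    simp

-- ===== VERDICT (by name: the statement is the Claim_ definition above) =====
theorem parse_examples_spec : Claim_equal_parse_examples := by
  intro t _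
  show parse_examples t = parse_examples_alt t
  rw [pvA_eq_staged, pvStaged_eq_alt]
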